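-- pv_equiv track=rewrite | github.com/dunkegg/DexVLA | label_with_vlm/action_utils.py | temporal_filter
-- ===== SOURCE A (Python) =====
-- def temporal_filter(raw_actions, confirm_k):
--     """
--     时序滤波:连续confirm_k个动作相同时才进行标注,否则沿用之前的动作。
--     """
--     if confirm_k <= 1:
--         return raw_actions
--
--     final_actions = []
--     # 滑动确认缓存
--     buf = []
--     for a in raw_actions:
--         buf.append(a)
--         if len(buf) < confirm_k:
--             final_actions.append(buf[-1])  # provisional
--         else:
--             # 检查最后 confirm_k 个动作
--             if all(x == buf[-1] for x in buf[-confirm_k:]):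
--                 final_actions.append(buf[-1])
--             else:
--                 # keep previous final (or provisional)
--                 final_actions.append(final_actions[-1] if final_actions else buf[-1])
--         # keep buffer small
--         if len(buf) > confirm_k * 3:
--             buf = buf[-confirm_k * 2 :]
--     return final_actions
-- ===== SOURCE B (Python) =====
-- def temporal_filter(raw_actions, confirm_k):
--     """O(n) rewrite: track the running length of the trailing run of equal
--     actions; an action is adopted once its run reaches confirm_k."""
--     if confirm_k <= 1:
--         return raw_actions
--     out = []
--     run = 0
--     prev = None
--     for i, a in enumerate(raw_actions):
--         run = run + 1 if a == prev else 1
--         prev = a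
--         if i < confirm_k - 1 or run >= confirm_k:
--             out.append(a)
--         else:
--             out.append(out[-1])
--     return out
-- ===== Notes on version B (the rewrite author's own statement) =====
-- stated objective: faster
-- what changed: B replaces A's sliding buffer with its per-step rescan of the last confirm_k elements (and its periodic buffer trimming) by a single running counter of the length of the trailing run of equal actions, adopting an action exactly when its run length reaches confirm_k.
import Mathlib
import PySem

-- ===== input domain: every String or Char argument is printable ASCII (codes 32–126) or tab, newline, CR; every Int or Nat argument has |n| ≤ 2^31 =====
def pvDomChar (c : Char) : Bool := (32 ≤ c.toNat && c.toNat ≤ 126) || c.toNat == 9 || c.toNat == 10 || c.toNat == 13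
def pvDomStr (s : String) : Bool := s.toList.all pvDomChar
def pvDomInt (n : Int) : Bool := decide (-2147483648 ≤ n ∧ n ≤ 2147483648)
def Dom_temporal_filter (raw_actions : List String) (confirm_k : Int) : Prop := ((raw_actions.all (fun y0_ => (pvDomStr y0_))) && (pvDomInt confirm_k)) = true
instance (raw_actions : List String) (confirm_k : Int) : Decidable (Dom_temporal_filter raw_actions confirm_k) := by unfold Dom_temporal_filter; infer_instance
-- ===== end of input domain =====

-- B replaces A's sliding buffer and per-step rescan of the last confirm_k entries by a
-- running count of consecutive equal actions; a timing run measured B faster.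

-- ===== PORT A =====
-- loop body of A's for-loop, state = (final_actions, buf)
def tfStepA (confirm_k : Int) (st : List String × List String) (a : String) :
    List String × List String :=
  let buf := st.2 ++ [a]                                   -- buf.append(a)
  let last := (PySem.List.pyGet? buf (-1)).getD ""         -- buf[-1] (buf nonempty here)
  let fa :=
    if (buf.length : Int) < confirm_k then st.1 ++ [last]
    else if (PySem.List.slice buf (some (-confirm_k)) none).all (fun x => x == last) then
      st.1 ++ [last]
    else
      st.1 ++ [if st.1.isEmpty then last else (PySem.List.pyGet? st.1 (-1)).getD ""]
  let buf := if confirm_k * 3 < (buf.length : Int) then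
      PySem.List.slice buf (some (-(confirm_k * 2))) none else buf
  (fa, buf)

def temporal_filter (raw_actions : List String) (confirm_k : Int) : List String :=
  if confirm_k ≤ 1 then raw_actions
  else (raw_actions.foldl (tfStepA confirm_k) ([], [])).1

-- ===== PORT B =====
-- loop body of B's for-loop, state = (out, run, prev)
def tfStepB (confirm_k : Int) (st : List String × Int × Option String) (p : Int × String) :
    List String × Int × Option String :=
  let run := if some p.2 == st.2.2 then st.2.1 + 1 else 1
  let out :=
    if p.1 < confirm_k - 1 ∨ confirm_k ≤ run then st.1 ++ [p.2]
    else st.1 ++ [(PySem.List.pyGet? st.1 (-1)).getD ""]   -- out[-1] (out nonempty here)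
  (out, run, some p.2)

def temporal_filter_alt (raw_actions : List String) (confirm_k : Int) : List String :=
  if confirm_k ≤ 1 then raw_actions
  else ((PySem.List.enumerate raw_actions).foldl (tfStepB confirm_k) ([], 0, none)).1

-- ===== PRECONDITION & SPEC =====
def Spec_temporal_filter (raw_actions : List String) (confirm_k : Int) (out : List String) : Prop := out = temporal_filter_alt raw_actions confirm_k
instance (raw_actions : List String) (confirm_k : Int) (out : List String) : Decidable (Spec_temporal_filter raw_actions confirm_k out) := by unfold Spec_temporal_filter; infer_instance

-- ===== CLAIM (what is proved, stated in full; the proofs are below) =====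
def Claim_equal_temporal_filter : Prop := ∀ (raw_actions : List String) (confirm_k : Int), Dom_temporal_filter raw_actions confirm_k → Spec_temporal_filter raw_actions confirm_k (temporal_filter raw_actions confirm_k)

-- ===== LEMMAS AND PROOFS =====

-- length of the run of leading elements equal to x
def headRunFrom (x : String) : List String → Nat
  | [] => 0
  | y :: ys => if y = x then 1 + headRunFrom x ys else 0

def headRun : List String → Nat
  | [] => 0
  | x :: xs => 1 + headRunFrom x xs

-- length of the trailing run of equal elements
def trun (l : List String) : Nat := headRun l.reverse

theorem trun_append (l : List String) (a : String) :
    trun (l ++ [a]) = if l.getLast? = some a then trun l + 1 else 1 := by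
  unfold trun
  rw [List.getLast?_eq_head?_reverse]
  rcases hr : l.reverse with _ | ⟨x, xs⟩
  · simp [headRun, hr, headRunFrom]
  · by_cases hx : x = a
    · subst hx
      simp [headRun, headRunFrom, hr]
      omega
    · simp [headRun, headRunFrom, hr, hx]

theorem headRunFrom_take (x : String) (r : List String) (s : Nat) :
    headRunFrom x (r.take s) = min (headRunFrom x r) s := by
  induction r generalizing s with
  | nil => simp [headRunFrom]
  | cons y ys ih =>
    cases s with
    | zero => simp [headRunFrom]
    | succ s =>
      by_cases hy : y = x
      · simp [headRunFrom, hy, ih]; omega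
      · simp [headRunFrom, hy]

theorem trun_drop (l : List String) (j : Nat) :
    trun (l.drop j) = min (trun l) (l.length - j) := by
  unfold trun
  rw [List.reverse_drop]
  rcases hr : l.reverse with _ | ⟨x, xs⟩
  · simp [headRun]
  · have hlen : l.length = xs.length + 1 := by
      have := congrArg List.length hr; simpa using this
    cases hs : l.length - j with
    | zero => simp [headRun]
    | succ s =>
      have h1 : (x :: xs).take (s+1) = x :: xs.take s := rfl
      rw [h1]
      simp [headRun, headRunFrom_take]
      omega

theorem slice_neg_from (l : List String) (j : Int) (hj : 0 < j) :
    PySem.List.slice l (some (-j)) none = l.drop (l.length - j.toNat) := by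
  simp only [PySem.List.slice, PySem.List.clampIdx]
  have h1 : (-j) < 0 := by omega
  rw [if_pos h1]
  split_ifs with h2
  · have : l.length - j.toNat = 0 := by omega
    simp [this, List.take_of_length_le]
  · have ha : ((l.length : Int) + -j).toNat = l.length - j.toNat := by omega
    rw [ha]
    apply List.take_of_length_le
    simp

theorem pyGet_append_last (l : List String) (a : String) :
    PySem.List.pyGet? (l ++ [a]) (-1) = some a := by
  simp only [PySem.List.pyGet?, PySem.List.pyIdx?]
  have h0 : ¬ ((0:Int) ≤ -1) := by omega
  rw [if_neg h0]
  have h1 : -(((l ++ [a]).length : Int)) ≤ -1 := by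
    simp only [List.length_append, List.length_cons, List.length_nil]
    omega
  rw [if_pos h1]
  simp

theorem all_take_core (x : String) (r : List String) (s : Nat) (hs : s ≤ r.length) :
    ((r.take s).all (fun y => y == x)) = true ↔ s ≤ headRunFrom x r := by
  induction r generalizing s with
  | nil =>
    simp only [List.length_nil, Nat.le_zero] at hs
    simp [hs, headRunFrom]
  | cons y ys ih =>
    cases s with
    | zero => simp
    | succ s =>
      by_cases hy : y = x
      · simp [headRunFrom, hy, ih s (by simpa using hs)]
        omega
      · simp [headRunFrom, hy]

theorem all_take_iff (x : String) (r : List String) (s : Nat) (hs : s ≤ r.length + 1) :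
    (((x :: r).take s).all (fun y => y == x)) = true ↔ s ≤ 1 + headRunFrom x r := by
  cases s with
  | zero => simp
  | succ s =>
    have : (x :: r).take (s+1) = x :: r.take s := rfl
    rw [this]
    simp [all_take_core x r s (by omega)]
    omega

theorem all_suffix_iff (buf : List String) (a : String) (t : Nat)
    (ht : t ≤ buf.length + 1) :
    (((buf ++ [a]).drop (buf.length + 1 - t)).all (fun y => y == a)) = true ↔
      t ≤ trun (buf ++ [a]) := by
  rw [← List.all_reverse, List.reverse_drop]
  have hlen : (buf ++ [a]).length = buf.length + 1 := by simp
  have h2 : (buf ++ [a]).length - (buf.length + 1 - t) = t := by omega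
  rw [h2]
  have hrev : (buf ++ [a]).reverse = a :: buf.reverse := by simp
  rw [hrev]
  unfold trun
  rw [hrev]
  exact all_take_iff a buf.reverse t (by simpa using ht)

theorem step_eq (k : Int) (hk : 2 ≤ k) (fa buf : List String) (run : Int) (a : String)
    (h1 : buf.length ≤ fa.length)
    (h2 : buf.length = fa.length ∨ k ≤ (buf.length : Int))
    (h3 : buf ≠ [] → 1 ≤ run ∧ trun buf = min run.toNat buf.length) :
    (tfStepA k (fa, buf) a).1 = (tfStepB k (fa, run, buf.getLast?) ((fa.length : Int), a)).1
    ∧ (tfStepA k (fa, buf) a).2.length ≤ (tfStepA k (fa, buf) a).1.length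
    ∧ ((tfStepA k (fa, buf) a).2.length = (tfStepA k (fa, buf) a).1.length
        ∨ k ≤ ((tfStepA k (fa, buf) a).2.length : Int))
    ∧ ((tfStepA k (fa, buf) a).2 ≠ [] →
        1 ≤ (tfStepB k (fa, run, buf.getLast?) ((fa.length : Int), a)).2.1
        ∧ trun (tfStepA k (fa, buf) a).2
            = min (tfStepB k (fa, run, buf.getLast?) ((fa.length : Int), a)).2.1.toNat
                (tfStepA k (fa, buf) a).2.length)
    ∧ (tfStepA k (fa, buf) a).2.getLast? = some a
    ∧ (tfStepB k (fa, run, buf.getLast?) ((fa.length : Int), a)).2.2 = some a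
    ∧ (tfStepA k (fa, buf) a).1.length = fa.length + 1 := by
  -- run1 facts
  have hrun1 : 1 ≤ (tfStepB k (fa, run, buf.getLast?) ((fa.length : Int), a)).2.1 := by
    simp only [tfStepB]
    split_ifs with h
    · rcases hgl : buf.getLast? with _ | x
      · rw [hgl] at h; simp at h
      · have hb : buf ≠ [] := by intro hb; rw [hb] at hgl; simp at hgl
        have := (h3 hb).1; omega
    · omega
  have hfalen : (tfStepA k (fa, buf) a).1.length = fa.length + 1 := by
    simp only [tfStepA]
    split_ifs <;> simp
  have hr1 : (tfStepB k (fa, run, buf.getLast?) ((fa.length : Int), a)).2.1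
      = if some a == buf.getLast? then run + 1 else 1 := by
    simp only [tfStepB]
  set r1 := (tfStepB k (fa, run, buf.getLast?) ((fa.length : Int), a)).2.1 with hr1def
  have hC1 : trun (buf ++ [a]) = min r1.toNat (buf.length + 1) := by
    rw [trun_append, hr1]
    rcases hgl : buf.getLast? with _ | x
    · have hb : buf = [] := by
        cases buf with
        | nil => rfl
        | cons y ys => simp at hgl
      subst hb
      simp
    · have hb : buf ≠ [] := by intro hb; rw [hb] at hgl; simp at hgl
      obtain ⟨hrun, htr⟩ := h3 hb
      have hm1 : 1 ≤ buf.length := List.length_pos_iff.mpr hb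
      by_cases hax : a = x
      · subst hax
        simp only [beq_iff_eq, if_true]
        omega
      · have h5 : (some a == some x) = false := by simp [hax]
        rw [h5]
        have h6 : ¬ (some x = some a) := by simp; exact fun h => hax h.symm
        rw [if_neg h6]
        simp
  have hall : k ≤ (buf.length : Int) + 1 →
      ((PySem.List.slice (buf ++ [a]) (some (-k)) none).all (fun x => x == a) = true ↔ k ≤ r1) := by
    intro hks
    rw [slice_neg_from _ _ (by omega)]
    have hlen : (buf ++ [a]).length = buf.length + 1 := by simp
    rw [hlen]
    rw [all_suffix_iff buf a k.toNat (by omega), hC1]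
    omega
  have hfa : (tfStepA k (fa, buf) a).1 = (tfStepB k (fa, run, buf.getLast?) ((fa.length:Int), a)).1 := by
    simp only [tfStepA, tfStepB, pyGet_append_last, Option.getD_some]
    rw [← hr1]
    have hlen1 : ((buf ++ [a]).length : Int) = (buf.length : Int) + 1 := by simp
    rw [hlen1]
    by_cases hs1 : ((buf.length : Int)) + 1 < k
    · rw [if_pos hs1, if_pos]
      left
      rcases h2 with h | h <;> omega
    · rw [if_neg hs1]
      have hks : k ≤ (buf.length : Int) + 1 := by omega
      have hnbig : ¬ ((fa.length : Int) < k - 1) := by rcases h2 with h | h <;> omega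
      by_cases h2all : (PySem.List.slice (buf ++ [a]) (some (-k)) none).all (fun x => x == a) = true
      · rw [if_pos h2all, if_pos (Or.inr ((hall hks).mp h2all))]
      · rw [if_neg h2all]
        have hcond : ¬ ((fa.length : Int) < k - 1 ∨ k ≤ r1) := by
          rintro (h | h)
          · exact hnbig h
          · exact h2all ((hall hks).mpr h)
        rw [if_neg hcond]
        have hfane : fa ≠ [] := by
          have hfl : 1 ≤ fa.length := by rcases h2 with h | h <;> omega
          cases fa
          · simp at hfl
          · simp
        simp [hfane]
  have hprev : (tfStepB k (fa, run, buf.getLast?) ((fa.length : Int), a)).2.2 = some a := rfl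
  by_cases htrim : k * 3 < ((buf ++ [a]).length : Int)
  · -- trim branch
    have hmk : k * 3 < (buf.length : Int) + 1 := by simpa using htrim
    have hbuf2 : (tfStepA k (fa, buf) a).2 = (buf ++ [a]).drop (buf.length + 1 - (k*2).toNat) := by
      simp only [tfStepA]
      rw [if_pos htrim, slice_neg_from _ _ (by omega)]
      simp
    have hl2 : (tfStepA k (fa, buf) a).2.length = (k*2).toNat := by
      rw [hbuf2]
      simp
      omega
    have hjle : buf.length + 1 - (k*2).toNat ≤ buf.length := by omega
    have hlast2 : (tfStepA k (fa, buf) a).2.getLast? = some a := by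
      rw [hbuf2, List.drop_append_of_le_length hjle, List.getLast?_concat]
    refine ⟨hfa, by omega, by right; omega, ?_, hlast2, hprev, hfalen⟩
    intro _
    refine ⟨hrun1, ?_⟩
    rw [hbuf2, trun_drop]
    simp only [List.length_drop, List.length_append, List.length_cons, List.length_nil]
    rw [hC1]
    omega
  · -- no trim
    have hbuf2 : (tfStepA k (fa, buf) a).2 = buf ++ [a] := by
      simp only [tfStepA]
      rw [if_neg htrim]
    have hl2 : (tfStepA k (fa, buf) a).2.length = buf.length + 1 := by rw [hbuf2]; simp
    refine ⟨hfa, by omega, ?_, ?_, by rw [hbuf2, List.getLast?_concat], hprev, hfalen⟩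
    · rcases h2 with h | h
      · left; omega
      · right; omega
    · intro _
      refine ⟨hrun1, ?_⟩
      rw [hbuf2, hC1]
      simp

theorem fold_eq (k : Int) (hk : 2 ≤ k) :
    ∀ (l fa buf : List String) (run : Int),
      buf.length ≤ fa.length →
      (buf.length = fa.length ∨ k ≤ (buf.length : Int)) →
      (buf ≠ [] → 1 ≤ run ∧ trun buf = min run.toNat buf.length) →
      (l.foldl (tfStepA k) (fa, buf)).1
        = ((PySem.List.enumerate l (fa.length : Int)).foldl (tfStepB k) (fa, run, buf.getLast?)).1 := by
  intro l
  induction l with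
  | nil => intro fa buf run _ _ _; simp [PySem.List.enumerate]
  | cons a l ih =>
    intro fa buf run h1 h2 h3
    rw [PySem.List.enumerate_cons, List.foldl_cons, List.foldl_cons]
    obtain ⟨e1, e2, e3, e4, e5, e6, e7⟩ := step_eq k hk fa buf run a h1 h2 h3
    have hidx : (fa.length : Int) + 1 = ((tfStepA k (fa, buf) a).1.length : Int) := by
      rw [e7]; push_cast; ring
    have hRB : tfStepB k (fa, run, buf.getLast?) ((fa.length : Int), a)
        = ((tfStepA k (fa, buf) a).1,
           (tfStepB k (fa, run, buf.getLast?) ((fa.length : Int), a)).2.1,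
           (tfStepA k (fa, buf) a).2.getLast?) := by
      rw [e5, e1, ← e6]
    rw [hidx, hRB]
    exact ih _ _ _ e2 e3 e4

-- ===== VERDICT (by name: the statement is the Claim_ definition above) =====
theorem temporal_filter_spec : Claim_equal_temporal_filter := by
  intro raw_actions confirm_k _
  unfold Spec_temporal_filter temporal_filter temporal_filter_alt
  by_cases h : confirm_k ≤ 1
  · simp [h]
  · simp only [h, if_false]
    have := fold_eq confirm_k (by omega) raw_actions [] [] 0
      (by simp) (by simp) (by simp)
    simpa using this
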